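-- pv_equiv track=rewrite | github.com/Zazmuz/advent_of_code | 2025/10/10.1.py | dp
-- ===== SOURCE A (Python) =====
-- def dp(goal, state, used, idx, flipList):
--     if state == goal:
--         return used
--     elif idx >= len(flipList):
--         return 99999999999999
--
--     res = 99999999999999
--
--     newState = state ^ flipList[idx]
--     res = min(res, dp(goal, state, used, idx+1, flipList), dp(goal, newState, used+1, idx+1, flipList))
--     return res
-- ===== SOURCE B (Python) =====
-- def dp(goal, state, used, idx, flipList):
--     INF = 99999999999999
--     n = len(flipList)
--     if state == goal:
--         return used
--     if idx >= n:
--         return INF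
--     target = goal ^ state
--     # best maps each xor value reachable from the flips at positions idx..n-1
--     # to the minimum number of flips producing it
--     best = {0: 0}
--     for j in range(idx, n):
--         f = flipList[j]
--         nxt = dict(best)
--         for x, c in best.items():
--             y = x ^ f
--             if y not in nxt or c + 1 < nxt[y]:
--                 nxt[y] = c + 1
--         best = nxt
--     if target in best:
--         return min(used + best[target], INF)
--     return INF
-- ===== Notes on version B (the rewrite author's own statement) =====
-- stated objective: alternative
-- what changed: A's exponential branch recursion (try/skip every flip, threading 'used' through 2^k calls) is replaced by a single forward pass over the flips that maintains a dictionary from each reachable XOR value to its minimum flip count, then looks up goal^state once.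
import Mathlib
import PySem

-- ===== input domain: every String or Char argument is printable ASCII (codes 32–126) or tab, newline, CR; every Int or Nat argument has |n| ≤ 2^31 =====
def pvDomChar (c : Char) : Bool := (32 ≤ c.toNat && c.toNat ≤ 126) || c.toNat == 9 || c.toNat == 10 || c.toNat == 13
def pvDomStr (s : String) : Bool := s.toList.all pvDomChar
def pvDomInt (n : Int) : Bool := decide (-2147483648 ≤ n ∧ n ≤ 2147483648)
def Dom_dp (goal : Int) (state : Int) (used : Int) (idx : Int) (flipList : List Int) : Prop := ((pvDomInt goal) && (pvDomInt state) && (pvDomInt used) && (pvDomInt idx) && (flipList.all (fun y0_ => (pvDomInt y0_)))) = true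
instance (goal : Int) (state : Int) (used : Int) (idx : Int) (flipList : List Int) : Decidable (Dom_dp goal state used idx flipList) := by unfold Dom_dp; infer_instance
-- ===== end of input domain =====

-- B replaces A's branch-on-every-flip recursion by one forward pass that maintains a
-- dictionary mapping each reachable XOR value to its minimum flip count (objective: alternative).

-- ===== PORT A =====
def dp (goal : Int) (state : Int) (used : Int) (idx : Int) (flipList : List Int) : Int :=
  if state = goal then used
  else if idx ≥ (flipList.length : Int) then 99999999999999
  else
    match PySem.List.pyGet? flipList idx with
    | none => 99999999999999   -- Python raises IndexError here; excluded by Pre_dp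
    | some f =>
      let newState := PySem.Int.bxor state f
      min (min 99999999999999 (dp goal state used (idx + 1) flipList))
          (dp goal newState (used + 1) (idx + 1) flipList)
termination_by ((flipList.length : Int) - idx).toNat
decreasing_by all_goals omega

-- ===== PORT B =====
-- one pass of B's inner loop: nxt = dict(best); for x, c in best.items(): …
def dpStep (best : PySem.Dict Int Int) (f : Int) : PySem.Dict Int Int :=
  best.items.foldl (fun nxt p =>
    let y := PySem.Int.bxor p.1 f
    match nxt.get? y with
    | none => nxt.insert y (p.2 + 1)
    | some v => if p.2 + 1 < v then nxt.insert y (p.2 + 1) else nxt) best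

def dp_alt (goal : Int) (state : Int) (used : Int) (idx : Int) (flipList : List Int) : Int :=
  let INF : Int := 99999999999999
  let n : Int := (flipList.length : Int)
  if state = goal then used
  else if idx ≥ n then INF
  else
    let target := PySem.Int.bxor goal state
    let best := (PySem.List.pyRange idx n 1).foldl
      (fun best j =>
        match PySem.List.pyGet? flipList j with
        | none => best   -- Python raises IndexError here; excluded by Pre_dp
        | some f => dpStep best f)
      (PySem.Dict.empty.insert 0 0)
    match best.get? target with
    | some v => min (used + v) INF
    | none => INF

-- ===== PRECONDITION & SPEC =====
-- Pre_dp excludes exactly the inputs where A raises IndexError (state ≠ goal and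
-- idx < -len(flipList), so flipList[idx] is out of range); B raises there too.
def Pre_dp (goal : Int) (state : Int) (used : Int) (idx : Int) (flipList : List Int) : Prop :=
  state = goal ∨ -(flipList.length : Int) ≤ idx
instance (goal : Int) (state : Int) (used : Int) (idx : Int) (flipList : List Int) : Decidable (Pre_dp goal state used idx flipList) := by unfold Pre_dp; infer_instance

def pvWitness_dp : Int × Int × Int × Int × List Int := (3, 1, 0, 0, [2, 1])

def Spec_dp (goal : Int) (state : Int) (used : Int) (idx : Int) (flipList : List Int) (out : Int) : Prop := out = dp_alt goal state used idx flipList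
instance (goal : Int) (state : Int) (used : Int) (idx : Int) (flipList : List Int) (out : Int) : Decidable (Spec_dp goal state used idx flipList out) := by unfold Spec_dp; infer_instance

-- ===== CLAIM (what is proved, stated in full; the proofs are below) =====
def Claim_equal_dp : Prop := ∀ (goal : Int) (state : Int) (used : Int) (idx : Int) (flipList : List Int), Dom_dp goal state used idx flipList → Pre_dp goal state used idx flipList → Spec_dp goal state used idx flipList (dp goal state used idx flipList)

-- ===== LEMMAS AND PROOFS =====

-- ---- xor algebra for PySem.Int.bxor ----
theorem bxor_negRep (m n : Nat) :
    PySem.Int.bxor (-(m : Int) - 1) (-(n : Int) - 1) = ((m ^^^ n : Nat) : Int) := by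
  simp only [PySem.Int.bxor]
  rw [if_neg (by omega), if_neg (by omega)]
  norm_num

theorem bxor_posNeg (m n : Nat) :
    PySem.Int.bxor (m : Int) (-(n : Int) - 1) = -((m ^^^ n : Nat) : Int) - 1 := by
  simp only [PySem.Int.bxor]
  rw [if_pos (by omega), if_neg (by omega)]
  norm_num

theorem bxor_negPos (m n : Nat) :
    PySem.Int.bxor (-(m : Int) - 1) (n : Int) = -((m ^^^ n : Nat) : Int) - 1 := by
  simp only [PySem.Int.bxor]
  rw [if_neg (by omega), if_pos (by omega)]
  norm_num

theorem int_rep (a : Int) : (∃ m : Nat, a = (m : Int)) ∨ (∃ m : Nat, a = -(m : Int) - 1) := by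
  by_cases h : 0 ≤ a
  · exact Or.inl ⟨a.toNat, by omega⟩
  · exact Or.inr ⟨(-a - 1).toNat, by omega⟩

theorem bxor_assoc (a b c : Int) :
    PySem.Int.bxor (PySem.Int.bxor a b) c = PySem.Int.bxor a (PySem.Int.bxor b c) := by
  rcases int_rep a with ⟨x, rfl⟩ | ⟨x, rfl⟩ <;>
    rcases int_rep b with ⟨y, rfl⟩ | ⟨y, rfl⟩ <;>
      rcases int_rep c with ⟨z, rfl⟩ | ⟨z, rfl⟩ <;>
        simp [PySem.Int.bxor_natCast, bxor_posNeg, bxor_negPos, bxor_negRep, Nat.xor_assoc]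

theorem bxor_eq_zero_iff (a b : Int) : PySem.Int.bxor a b = 0 ↔ a = b := by
  rcases int_rep a with ⟨x, rfl⟩ | ⟨x, rfl⟩ <;> rcases int_rep b with ⟨y, rfl⟩ | ⟨y, rfl⟩
  · rw [PySem.Int.bxor_natCast]
    constructor
    · intro h
      have hx : x ^^^ y = 0 := by exact_mod_cast h
      have := Nat.xor_eq_zero_iff.1 hx
      exact_mod_cast this
    · intro h
      have hx : x = y := by exact_mod_cast h
      simp [hx]
  · rw [bxor_posNeg]; constructor <;> intro h <;> omega
  · rw [bxor_negPos]; constructor <;> intro h <;> omega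
  · rw [bxor_negRep]
    constructor
    · intro h
      have hx : x ^^^ y = 0 := by exact_mod_cast h
      have := Nat.xor_eq_zero_iff.1 hx
      omega
    · intro h
      have hx : x = y := by omega
      simp [hx]
theorem bxor_cancel_right (a b : Int) : PySem.Int.bxor (PySem.Int.bxor a b) b = a := by
  rw [bxor_assoc, PySem.Int.bxor_self, PySem.Int.bxor_zero]

theorem bxor_eq_iff {f x y : Int} : PySem.Int.bxor x f = y ↔ x = PySem.Int.bxor y f := by
  constructor
  · rintro rfl; rw [bxor_cancel_right]
  · rintro rfl; rw [bxor_cancel_right]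

-- ---- the common mathematical skeleton: minimum subset size with given xor ----
def optMin : Option Nat → Option Nat → Option Nat
  | none, b => b
  | some a, none => some a
  | some a, some b => some (min a b)

/-- minimum number of elements of `l` (each usable once) whose xor is `x` -/
def msz : List Int → Int → Option Nat
  | [], x => if x = 0 then some 0 else none
  | f :: r, x => optMin (msz r x) (Option.map (· + 1) (msz r (PySem.Int.bxor x f)))

def toVal (used : Int) : Option Nat → Int
  | none => 99999999999999
  | some k => min (used + (k : Int)) 99999999999999

/-- the suffix of flips A and B actually read: flipList[j] for j = idx … len-1 -/
def sfx (flipList : List Int) (idx : Int) : List Int :=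
  if idx ≥ (flipList.length : Int) then []
  else ((PySem.List.pyGet? flipList idx).getD 0) :: sfx flipList (idx + 1)
termination_by ((flipList.length : Int) - idx).toNat
decreasing_by omega

theorem msz_zero (l : List Int) : msz l 0 = some 0 := by
  induction l with
  | nil => simp [msz]
  | cons f r ih =>
    cases h : msz r (PySem.Int.bxor 0 f) <;> simp [msz, ih, h, optMin]

theorem pyGet?_isSome (fl : List Int) (i : Int) (h1 : -(fl.length : Int) ≤ i)
    (h2 : i < (fl.length : Int)) : ∃ v, PySem.List.pyGet? fl i = some v := by
  by_cases hp : 0 ≤ i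
  · refine ⟨fl[i.toNat]'(by omega), ?_⟩
    simp only [PySem.List.pyGet?, PySem.List.pyIdx?, if_pos hp, if_pos h2, Option.bind_some]
    exact List.getElem?_eq_getElem (by omega)
  · refine ⟨fl[fl.length - (-i).toNat]'(by omega), ?_⟩
    simp only [PySem.List.pyGet?, PySem.List.pyIdx?, if_neg hp, if_pos h1, Option.bind_some]
    exact List.getElem?_eq_getElem (by omega)

-- ---- A equals the skeleton ----
theorem combine_min (u : Int) (a b : Option Nat) :
    min (min 99999999999999 (toVal u a)) (toVal (u + 1) b)
      = toVal u (optMin a (Option.map (· + 1) b)) := by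
  cases a <;> cases b <;> simp [toVal, optMin] <;> push_cast <;> omega

theorem dp_eq_skeleton (fl : List Int) :
    ∀ (k : Nat) (goal state used idx : Int),
      (((fl.length : Int) - idx).toNat ≤ k) → -(fl.length : Int) ≤ idx →
      dp goal state used idx fl
        = if state = goal then used
          else toVal used (msz (sfx fl idx) (PySem.Int.bxor goal state)) := by
  intro k
  induction k with
  | zero =>
    intro goal state used idx hk hpre
    rw [dp, sfx.eq_def]
    by_cases hg : state = goal
    · simp [hg]
    · have hlen : idx ≥ (fl.length : Int) := by omega
      have ht : PySem.Int.bxor goal state ≠ 0 := fun h => hg ((bxor_eq_zero_iff _ _).1 h).symm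
      simp [hg, hlen, msz, ht, toVal]
  | succ k ih =>
    intro goal state used idx hk hpre
    rw [dp, sfx.eq_def]
    by_cases hg : state = goal
    · simp [hg]
    · by_cases hlen : idx ≥ (fl.length : Int)
      · have ht : PySem.Int.bxor goal state ≠ 0 := fun h => hg ((bxor_eq_zero_iff _ _).1 h).symm
        simp [hg, hlen, msz, ht, toVal]
      · obtain ⟨f, hf⟩ := pyGet?_isSome fl idx hpre (by omega)
        have hk' : ((fl.length : Int) - (idx + 1)).toNat ≤ k := by omega
        have hpre' : -(fl.length : Int) ≤ idx + 1 := by omega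
        have ih1 := ih goal state used (idx + 1) hk' hpre'
        have ih2 := ih goal (PySem.Int.bxor state f) (used + 1) (idx + 1) hk' hpre'
        simp only [hg, hlen, if_false, ite_false, hf, Option.getD_some]
        rw [ih1, ih2]
        have hxa : PySem.Int.bxor goal (PySem.Int.bxor state f)
            = PySem.Int.bxor (PySem.Int.bxor goal state) f := (bxor_assoc goal state f).symm
        simp only [hg, if_false, ite_false]
        set t := PySem.Int.bxor goal state with hT
        by_cases hfg : PySem.Int.bxor state f = goal
        · have ht0 : PySem.Int.bxor t f = 0 := by
            rw [hT, bxor_assoc]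
            rw [show PySem.Int.bxor state f = goal from hfg, PySem.Int.bxor_self]
          rw [if_pos hfg]
          simp only [msz, ht0, msz_zero]
          cases ha : msz (sfx fl (idx + 1)) t <;>
            simp [toVal, optMin] <;> push_cast <;> omega
        · have ht0 : PySem.Int.bxor goal (PySem.Int.bxor state f) = PySem.Int.bxor t f := by
            rw [hxa, hT]
          rw [if_neg hfg, ht0, combine_min]
          simp [msz]

-- ---- B equals the skeleton ----
def funStep (m : Int → Option Nat) (f : Int) : Int → Option Nat :=
  fun x => optMin (m x) (Option.map (· + 1) (m (PySem.Int.bxor x f)))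

def comb : (Int → Option Nat) → List Int → Int → Option Nat
  | m, [], x => m x
  | m, f :: fs, x => comb (funStep m f) fs x

def m0 : Int → Option Nat := fun x => if x = 0 then some 0 else none

-- the loop body of dpStep's fold
def dpF (f : Int) (nxt : PySem.Dict Int Int) (p : Int × Int) : PySem.Dict Int Int :=
  match nxt.get? (PySem.Int.bxor p.1 f) with
  | none => nxt.insert (PySem.Int.bxor p.1 f) (p.2 + 1)
  | some v => if p.2 + 1 < v then nxt.insert (PySem.Int.bxor p.1 f) (p.2 + 1) else nxt

theorem dpStep_eq_foldl (best : PySem.Dict Int Int) (f : Int) :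
    dpStep best f = best.items.foldl (dpF f) best := by
  rfl

theorem dpF_nodup (f : Int) (L : List (Int × Int)) :
    ∀ nxt : PySem.Dict Int Int, nxt.keys.Nodup → (L.foldl (dpF f) nxt).keys.Nodup := by
  induction L with
  | nil => intro nxt h; exact h
  | cons p L ih =>
    intro nxt h
    refine ih _ ?_
    unfold dpF
    cases hg : nxt.get? (PySem.Int.bxor p.1 f) with
    | none => exact PySem.Dict.nodup_keys_insert _ _ _ h
    | some v =>
      by_cases hc : p.2 + 1 < v <;> simp only [hc, if_true, if_false, ite_true, ite_false]
      · exact PySem.Dict.nodup_keys_insert _ _ _ h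
      · exact h

theorem foldl_dpF_untouched (f y : Int) (L : List (Int × Int)) :
    ∀ nxt : PySem.Dict Int Int, (∀ p ∈ L, PySem.Int.bxor p.1 f ≠ y) →
      (L.foldl (dpF f) nxt).get? y = nxt.get? y := by
  induction L with
  | nil => intro nxt _; rfl
  | cons p L ih =>
    intro nxt h
    have hp : PySem.Int.bxor p.1 f ≠ y := h p (List.mem_cons_self)
    have step : (dpF f nxt p).get? y = nxt.get? y := by
      unfold dpF
      cases hg : nxt.get? (PySem.Int.bxor p.1 f) with
      | none => rw [PySem.Dict.get?_insert, if_neg (fun hh => hp hh.symm)]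
      | some v =>
        show (if p.2 + 1 < v then nxt.insert (PySem.Int.bxor p.1 f) (p.2 + 1)
              else nxt).get? y = nxt.get? y
        rcases Classical.em (p.2 + 1 < v) with hc | hc
        · rw [if_pos hc, PySem.Dict.get?_insert, if_neg (fun hh => hp hh.symm)]
        · rw [if_neg hc]
    rw [List.foldl_cons, ih _ (fun q hq => h q (List.mem_cons_of_mem _ hq)), step]

theorem dpF_get_self (f : Int) (nxt : PySem.Dict Int Int) (k c : Int) :
    (dpF f nxt (k, c)).get? (PySem.Int.bxor k f)
      = match nxt.get? (PySem.Int.bxor k f) with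
        | none => some (c + 1)
        | some v => if c + 1 < v then some (c + 1) else some v := by
  unfold dpF
  cases hg : nxt.get? (PySem.Int.bxor k f) with
  | none => simp [PySem.Dict.get?_insert]
  | some v =>
    by_cases hc : c + 1 < v <;> simp [hc, hg, PySem.Dict.get?_insert]

theorem dpStep_get (best : PySem.Dict Int Int) (f y : Int) (hnd : best.keys.Nodup) :
    (dpStep best f).get? y
      = match best.get? (PySem.Int.bxor y f), best.get? y with
        | none, v => v
        | some c, none => some (c + 1)
        | some c, some v => if c + 1 < v then some (c + 1) else some v := by
  rw [dpStep_eq_foldl]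
  cases hm : best.get? (PySem.Int.bxor y f) with
  | none =>
    have hnot : ∀ p ∈ best.items, PySem.Int.bxor p.1 f ≠ y := by
      intro p hp hxy
      have hk : p.1 = PySem.Int.bxor y f := bxor_eq_iff.1 hxy
      have : PySem.Int.bxor y f ∈ best.keys := hk ▸ PySem.Dict.mem_keys_of_mem_items best hp
      exact ((PySem.Dict.get?_eq_none_iff_not_mem_keys best _).1 hm) this
    rw [foldl_dpF_untouched f y _ best hnot]
  | some c =>
    have hmem : (PySem.Int.bxor y f, c) ∈ best.items :=
      (PySem.Dict.get?_eq_some_iff_mem_items best _ c hnd).1 hm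
    obtain ⟨L1, L2, hL⟩ := List.append_of_mem hmem
    have hkeys : best.keys = L1.map Prod.fst ++ PySem.Int.bxor y f :: L2.map Prod.fst := by
      have : best.keys = best.items.map Prod.fst := rfl
      rw [this, hL]; simp
    have hnd' := hkeys ▸ hnd
    have hnotin : PySem.Int.bxor y f ∉ L1.map Prod.fst ∧ PySem.Int.bxor y f ∉ L2.map Prod.fst := by
      rw [List.nodup_append] at hnd'
      obtain ⟨h1, h2, h3⟩ := hnd'
      exact ⟨fun hin => h3 _ hin _ List.mem_cons_self rfl, (List.nodup_cons.1 h2).1⟩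
    have hnot1 : ∀ p ∈ L1, PySem.Int.bxor p.1 f ≠ y := by
      intro p hp hxy
      exact hnotin.1 ((bxor_eq_iff.1 hxy) ▸ List.mem_map_of_mem hp)
    have hnot2 : ∀ p ∈ L2, PySem.Int.bxor p.1 f ≠ y := by
      intro p hp hxy
      exact hnotin.2 ((bxor_eq_iff.1 hxy) ▸ List.mem_map_of_mem hp)
    have hyy : PySem.Int.bxor (PySem.Int.bxor y f) f = y := bxor_cancel_right y f
    rw [hL, List.foldl_append, List.foldl_cons,
      foldl_dpF_untouched f y L2 _ hnot2]
    have hmid : (L1.foldl (dpF f) best).get? y = best.get? y :=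
      foldl_dpF_untouched f y L1 best hnot1
    have hself := dpF_get_self f (L1.foldl (dpF f) best) (PySem.Int.bxor y f) c
    rw [hyy, hmid] at hself
    rw [hself]
    cases best.get? y <;> rfl

theorem loop_get (fs : List Int) :
    ∀ (d : PySem.Dict Int Int) (m : Int → Option Nat), d.keys.Nodup →
      (∀ x, d.get? x = Option.map (fun k : Nat => (k : Int)) (m x)) →
      ∀ x, (fs.foldl dpStep d).get? x = Option.map (fun k : Nat => (k : Int)) (comb m fs x) := by
  induction fs with
  | nil => intro d m _ h x; exact h x
  | cons f fs ih =>
    intro d m hnd h x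
    have hnd' : (dpStep d f).keys.Nodup := by
      rw [dpStep_eq_foldl]; exact dpF_nodup f d.items d hnd
    have h' : ∀ x, (dpStep d f).get? x
        = Option.map (fun k : Nat => (k : Int)) (funStep m f x) := by
      intro x
      rw [dpStep_get d f x hnd, h x, h (PySem.Int.bxor x f)]
      unfold funStep
      cases m (PySem.Int.bxor x f) with
      | none => cases m x <;> simp [optMin]
      | some c =>
        cases m x with
        | none => simp [optMin]
        | some v =>
          simp only [Option.map_some]
          by_cases hc : c + 1 < v
          · rw [if_pos (by exact_mod_cast hc)]
            simp [optMin, Nat.min_eq_right (by omega : c + 1 ≤ v)]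
          · rw [if_neg (by exact_mod_cast hc)]
            simp [optMin, Nat.min_eq_left (by omega : v ≤ c + 1)]
    rw [List.foldl_cons]
    exact ih (dpStep d f) (funStep m f) hnd' h' x

theorem comb_congr (fs : List Int) :
    ∀ (m m' : Int → Option Nat), (∀ x, m x = m' x) → ∀ x, comb m fs x = comb m' fs x := by
  induction fs with
  | nil => intro m m' h x; exact h x
  | cons f fs ih =>
    intro m m' h x
    exact ih _ _ (fun y => by unfold funStep; rw [h y, h (PySem.Int.bxor y f)]) x

theorem funStep_comm (m : Int → Option Nat) (f g x : Int) :
    funStep (funStep m f) g x = funStep (funStep m g) f x := by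
  unfold funStep
  have hx : PySem.Int.bxor (PySem.Int.bxor x g) f = PySem.Int.bxor (PySem.Int.bxor x f) g := by
    rw [bxor_assoc, bxor_assoc, PySem.Int.bxor_comm g f]
  rw [hx]
  cases m x <;> cases m (PySem.Int.bxor x f) <;> cases m (PySem.Int.bxor x g) <;>
    cases m (PySem.Int.bxor (PySem.Int.bxor x f) g) <;> simp [optMin] <;> omega

theorem comb_step (fs : List Int) :
    ∀ (m : Int → Option Nat) (f x : Int),
      comb (funStep m f) fs x
        = optMin (comb m fs x) (Option.map (· + 1) (comb m fs (PySem.Int.bxor x f))) := by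
  induction fs with
  | nil => intro m f x; rfl
  | cons g fs ih =>
    intro m f x
    show comb (funStep (funStep m f) g) fs x = _
    rw [comb_congr fs _ _ (funStep_comm m f g), ih (funStep m g) f x]
    rfl

theorem msz_eq_comb (fs : List Int) : ∀ x, msz fs x = comb m0 fs x := by
  induction fs with
  | nil => intro x; rfl
  | cons f fs ih =>
    intro x
    show msz (f :: fs) x = comb (funStep m0 f) fs x
    rw [comb_step fs m0 f x, msz, ih x, ih (PySem.Int.bxor x f)]

theorem d0_get (x : Int) :
    (PySem.Dict.empty.insert (0 : Int) (0 : Int)).get? x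
      = Option.map (fun k : Nat => (k : Int)) (m0 x) := by
  rw [PySem.Dict.get?_insert]
  unfold m0
  by_cases h : x = 0 <;> simp [h, PySem.Dict.get?_empty]

theorem range_fold_eq_sfx (fl : List Int) :
    ∀ (k : Nat) (idx : Int), (((fl.length : Int) - idx).toNat ≤ k) → -(fl.length : Int) ≤ idx →
      ∀ d : PySem.Dict Int Int,
        (PySem.List.pyRange idx (fl.length : Int) 1).foldl
          (fun best j =>
            match PySem.List.pyGet? fl j with
            | none => best
            | some f => dpStep best f) d
          = (sfx fl idx).foldl dpStep d := by
  intro k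
  induction k with
  | zero =>
    intro idx hk hpre d
    have hge : (fl.length : Int) ≤ idx := by omega
    rw [sfx.eq_def, if_pos (by omega)]
    rw [show PySem.List.pyRange idx (fl.length : Int) 1 = [] from by
      simp [PySem.List.pyRange]; omega]
    rfl
  | succ k ih =>
    intro idx hk hpre d
    by_cases hge : (fl.length : Int) ≤ idx
    · rw [sfx.eq_def, if_pos (by omega)]
      rw [show PySem.List.pyRange idx (fl.length : Int) 1 = [] from by
        simp [PySem.List.pyRange]; omega]
      rfl
    · obtain ⟨f, hf⟩ := pyGet?_isSome fl idx hpre (by omega)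
      rw [sfx.eq_def, if_neg (by omega), PySem.List.pyRange_one_cons (by omega), List.foldl_cons,
        List.foldl_cons, hf]
      simp only [Option.getD_some]
      exact ih (idx + 1) (by omega) (by omega) (dpStep d f)

theorem dp_alt_eq_skeleton (goal state used idx : Int) (fl : List Int)
    (hpre : -(fl.length : Int) ≤ idx) :
    dp_alt goal state used idx fl
      = if state = goal then used
        else toVal used (msz (sfx fl idx) (PySem.Int.bxor goal state)) := by
  unfold dp_alt
  by_cases hg : state = goal
  · simp [hg]
  · simp only [hg, if_false, ite_false]
    by_cases hge : idx ≥ (fl.length : Int)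
    · have ht : PySem.Int.bxor goal state ≠ 0 := fun h => hg ((bxor_eq_zero_iff _ _).1 h).symm
      rw [sfx.eq_def, if_pos hge]
      simp [hge, msz, ht, toVal]
    · simp only [hge, if_false, ite_false]
      rw [range_fold_eq_sfx fl ((fl.length : Int) - idx).toNat idx (le_refl _) hpre]
      have hnd0 : (PySem.Dict.empty.insert (0 : Int) (0 : Int)).keys.Nodup :=
        PySem.Dict.nodup_keys_insert _ _ _ (by simp [PySem.Dict.keys, PySem.Dict.empty])
      rw [loop_get (sfx fl idx) _ m0 hnd0 d0_get (PySem.Int.bxor goal state)]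
      rw [← msz_eq_comb]
      cases msz (sfx fl idx) (PySem.Int.bxor goal state) <;> simp [toVal]

-- ===== VERDICT (by name: the statement is the Claim_ definition above) =====
theorem dp_spec : Claim_equal_dp := by
  intro goal state used idx fl _ hpre
  unfold Spec_dp
  rcases hpre with hg | hpre
  · rw [dp, dp_alt.eq_def]
    simp [hg]
  · rw [dp_eq_skeleton fl ((fl.length : Int) - idx).toNat goal state used idx (le_refl _) hpre,
      dp_alt_eq_skeleton goal state used idx fl hpre]
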